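-- pv_equiv track=rewrite | github.com/ofekax/amongo_ass | src/models/deployment/check_deployment.py | fix_username
-- ===== SOURCE A (Python) =====
-- def fix_username(username: str) -> str:
--     new_username: str = ''
--     for char in username:
--         if not char.isdigit():
--             new_username = new_username + char
--         else:
--             new_username = new_username + '0' + char
--
--     return new_username
-- ===== SOURCE B (Python) =====
-- import re
--
-- def fix_username(username: str) -> str:
--     return re.sub(r'(\d)', r'0\1', username)
-- ===== Notes on version B (the rewrite author's own statement) =====
-- stated objective: idiomatic
-- what changed: Replaced the explicit character loop with string accumulator by a single regex substitution that prepends a zero character to each digit via a backreference.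
import Mathlib
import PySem

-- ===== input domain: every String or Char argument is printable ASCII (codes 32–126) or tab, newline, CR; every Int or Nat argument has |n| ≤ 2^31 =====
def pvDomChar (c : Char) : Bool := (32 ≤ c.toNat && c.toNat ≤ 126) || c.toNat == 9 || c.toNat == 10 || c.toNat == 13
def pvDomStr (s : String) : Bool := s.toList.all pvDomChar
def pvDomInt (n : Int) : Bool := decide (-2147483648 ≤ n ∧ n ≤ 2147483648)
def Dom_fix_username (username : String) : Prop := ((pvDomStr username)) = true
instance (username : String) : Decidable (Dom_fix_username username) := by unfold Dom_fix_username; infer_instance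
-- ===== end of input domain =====

-- B prepends '0' to each digit by a single regex-style substitution (flatMap) instead of A's char-by-char loop with a string accumulator.

-- ===== PORT A =====
def fix_username (username : String) : String :=
  username.toList.foldl
    (fun new_username char =>
      if ¬ PySem.Chars.isdigit char then new_username ++ String.ofList [char]
      else new_username ++ String.ofList ['0'] ++ String.ofList [char]) ""

-- ===== PORT B =====
-- re.sub(r'(\d)', r'0\1', username): each digit is replaced by '0' followed by itself
-- (ported as a flatMap over the characters; on the ASCII domain \d coincides with isdigit).
def fix_username_alt (username : String) : String :=
  String.ofList (username.toList.flatMap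
    (fun c => if PySem.Chars.isdigit c then ['0', c] else [c]))

-- ===== PRECONDITION & SPEC =====
def Spec_fix_username (username : String) (out : String) : Prop := out = fix_username_alt username
instance (username : String) (out : String) : Decidable (Spec_fix_username username out) := by unfold Spec_fix_username; infer_instance

-- ===== CLAIM (what is proved, stated in full; the proofs are below) =====
def Claim_equal_fix_username : Prop := ∀ (username : String), Dom_fix_username username → Spec_fix_username username (fix_username username)

-- ===== LEMMAS AND PROOFS =====

theorem fix_username_aux (l : List Char) (acc : String) :
    (l.foldl
      (fun new_username char =>
        if ¬ PySem.Chars.isdigit char then new_username ++ String.ofList [char]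
        else new_username ++ String.ofList ['0'] ++ String.ofList [char]) acc).toList
    = acc.toList ++ l.flatMap
        (fun c => if PySem.Chars.isdigit c then ['0', c] else [c]) := by
  induction l generalizing acc with
  | nil => simp
  | cons c l ih =>
    rw [List.foldl_cons, ih]
    by_cases h : PySem.Chars.isdigit c
    · simp [h]
    · simp [h]

-- ===== VERDICT (by name: the statement is the Claim_ definition above) =====
theorem fix_username_spec : Claim_equal_fix_username := by
  intro username _
  unfold Spec_fix_username fix_username fix_username_alt
  apply String.toList_inj.mp
  simpa using fix_username_aux username.toList ""
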